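-- pv_equiv track=rewrite | github.com/WDFQ/COMPX216_N-Grams | assignment3.py | build_bigram
-- ===== SOURCE A (Python) =====
-- def build_bigram(sequence):
--     # Task 1.2
--     # Return a bigram model.
--     # Replace the line below with your code.
--
--     #current and previous word
--     prev_word = None
--
--     #create outer dictionary
--     outer_dictionary = {}
--
--
--     #loop through the text document
--     for word in sequence:
--
--         if(prev_word is None):
--             #prev word
--             prev_word = (word, )
--             continue
--
--         #if prev word is in outer dictionary
--         if(prev_word in outer_dictionary):
--             inner_dictionary = outer_dictionary[prev_word]
--
--              #if word is already in inner dictionary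
--             if word in inner_dictionary:
--                 #increment the value for that key (word)
--                 inner_dictionary[word] += 1
--             else:
--                 #create a new entry in the inner dictionary and make value = 1
--                 inner_dictionary[word] = 1
--
--             #set value of outer dict to inner dict with current word
--             outer_dictionary[prev_word] = inner_dictionary
--         else:
--             #create
--             inner_dictionary = {}
--             #create a new entry in the inner dictionary and make value = 1
--             inner_dictionary[word] = 1
--              #set value of outer dict to inner dict with current word
--             outer_dictionary[prev_word] = inner_dictionary
--
--         prev_word = (word, )
--
--     return outer_dictionary
-- ===== SOURCE B (Python) =====
-- def build_bigram(sequence):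
--     # Stage 1: flat counting -- one dict keyed by the whole bigram pair.
--     words = list(sequence)
--     counts = {}
--     for pair in zip(words, words[1:]):
--         counts[pair] = counts.get(pair, 0) + 1
--     # Stage 2: group the finished pair-counts into the nested model.
--     model = {}
--     for (w1, w2), c in counts.items():
--         model.setdefault((w1,), {})[w2] = c
--     return model
-- ===== Notes on version B (the rewrite author's own statement) =====
-- stated objective: alternative
-- what changed: A builds the nested model incrementally with a prev_word/None state machine and per-word branching on both dict levels; B is a two-stage algorithm: it first builds a flat counter keyed by whole bigram pairs and only then groups the finished counts into the nested model, never updating a nested dict during counting.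
import Mathlib
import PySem

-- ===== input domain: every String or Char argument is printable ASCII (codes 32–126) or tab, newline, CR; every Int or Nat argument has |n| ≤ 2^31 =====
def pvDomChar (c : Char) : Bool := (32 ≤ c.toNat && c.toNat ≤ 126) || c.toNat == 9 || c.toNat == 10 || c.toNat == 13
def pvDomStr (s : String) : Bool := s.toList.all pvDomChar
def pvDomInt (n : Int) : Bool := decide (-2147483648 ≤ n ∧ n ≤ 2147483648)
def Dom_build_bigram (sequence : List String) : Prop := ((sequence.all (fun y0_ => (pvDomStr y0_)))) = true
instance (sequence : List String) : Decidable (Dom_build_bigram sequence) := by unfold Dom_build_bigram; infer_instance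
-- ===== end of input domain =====

-- B replaces A's prev_word state machine over nested dicts by a two-stage algorithm:
-- a flat counter keyed by whole bigram pairs, then a grouping pass into the nested model
-- (objective: alternative; same O(n) cost).

-- ===== PORT A =====
-- one loop iteration of A's 'for word in sequence' (state = (prev_word, outer_dictionary))
def bbStepA (st : Option (List String) × PySem.Dict (List String) (PySem.Dict String Int))
    (word : String) : Option (List String) × PySem.Dict (List String) (PySem.Dict String Int) :=
  match st.1 with
  | none => (some [word], st.2)             -- prev_word = (word,); continue
  | some prev =>
    let outer := st.2
    let outer' :=
      if outer.contains prev then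
        let inner := outer.getD prev PySem.Dict.empty   -- outer_dictionary[prev_word] (guarded by contains)
        let inner' := if inner.contains word
          then inner.insert word (inner.getD word 0 + 1)
          else inner.insert word 1
        outer.insert prev inner'
      else
        let inner : PySem.Dict String Int := PySem.Dict.empty
        let inner' := inner.insert word 1
        outer.insert prev inner'
    (some [word], outer')

def build_bigram (sequence : List String) : List (List String × List (String × Int)) :=
  let st := sequence.foldl bbStepA (none, PySem.Dict.empty)
  st.2.items.map (fun p => (p.1, p.2.items))

-- ===== PORT B =====
-- stage 1: 'counts[pair] = counts.get(pair, 0) + 1' over zip(words, words[1:])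
def bbCountStep (d : PySem.Dict (String × String) Int) (p : String × String) :
    PySem.Dict (String × String) Int :=
  d.insert p (d.getD p 0 + 1)

-- stage 2: 'model.setdefault((w1,), {})[w2] = c' over counts.items()
def bbGroupStep (m : PySem.Dict (List String) (PySem.Dict String Int))
    (it : (String × String) × Int) : PySem.Dict (List String) (PySem.Dict String Int) :=
  let m' := m.setdefault [it.1.1] PySem.Dict.empty
  m'.insert [it.1.1] ((m'.getD [it.1.1] PySem.Dict.empty).insert it.1.2 it.2)

def build_bigram_alt (sequence : List String) : List (List String × List (String × Int)) :=
  let words := sequence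
  let counts := (words.zip (PySem.List.slice words (some 1) none)).foldl bbCountStep PySem.Dict.empty
  let model := counts.items.foldl bbGroupStep PySem.Dict.empty
  model.items.map (fun p => (p.1, p.2.items))

-- ===== PRECONDITION & SPEC =====
def Spec_build_bigram (sequence : List String) (out : List (List String × List (String × Int))) : Prop := out = build_bigram_alt sequence
instance (sequence : List String) (out : List (List String × List (String × Int))) : Decidable (Spec_build_bigram sequence out) := by unfold Spec_build_bigram; infer_instance

-- ===== CLAIM (what is proved, stated in full; the proofs are below) =====
def Claim_equal_build_bigram : Prop := ∀ (sequence : List String), Dom_build_bigram sequence → Spec_build_bigram sequence (build_bigram sequence)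

-- ===== LEMMAS AND PROOFS =====

-- A's loop body, seen as a step over one consecutive pair (proof-only view of bbStepA)
def bbNStep (m : PySem.Dict (List String) (PySem.Dict String Int)) (pr : String × String) :
    PySem.Dict (List String) (PySem.Dict String Int) :=
  (bbStepA (some [pr.1], m) pr.2).2

-- the update both step functions perform on an already-present bigram slot
def bbUpd (x : String) (y : String) (v : Int)
    (m : PySem.Dict (List String) (PySem.Dict String Int)) :
    PySem.Dict (List String) (PySem.Dict String Int) :=
  m.insert [x] ((m.getD [x] PySem.Dict.empty).insert y v)

-- A's loop from state (some [x], outer) is the fold of bbNStep over the consecutive pairs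
lemma bbLoopA_eq (rest : List String) (x : String)
    (outer : PySem.Dict (List String) (PySem.Dict String Int)) :
    (rest.foldl bbStepA (some [x], outer)).2
      = ((x :: rest).zip rest).foldl bbNStep outer := by
  induction rest generalizing x outer with
  | nil => rfl
  | cons y rest ih =>
    simp only [List.foldl_cons, List.zip_cons_cons]
    have h1 : bbStepA (some [x], outer) y = (some [y], bbNStep outer (x, y)) := rfl
    rw [h1, ih]

-- inserts at two distinct keys commute when the first key is already present
lemma dict_insert_comm {κ ν : Type} [BEq κ] [LawfulBEq κ]
    (d : PySem.Dict κ ν) (k k' : κ) (v w : ν)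
    (hk : d.contains k = true) (hne : k ≠ k') :
    (d.insert k v).insert k' w = (d.insert k' w).insert k v := by
  have hk2 : (d.insert k' w).contains k = true := by
    simp [PySem.Dict.contains_insert, hk]
  apply PySem.Dict.ext
  by_cases hk' : d.contains k' = true
  · have hk'2 : (d.insert k v).contains k' = true := by
      simp [PySem.Dict.contains_insert, hk']
    rw [PySem.Dict.items_insert_of_contains _ w hk'2,
        PySem.Dict.items_insert_of_contains _ v hk2,
        PySem.Dict.items_insert_of_contains _ v hk,
        PySem.Dict.items_insert_of_contains _ w hk']
    simp only [List.map_map]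
    apply List.map_congr_left
    intro p _
    by_cases h1 : p.1 = k <;> by_cases h2 : p.1 = k' <;>
      simp_all [Function.comp]
  · have hk'2 : (d.insert k v).contains k' = false := by
      simp only [PySem.Dict.contains_insert, Bool.or_eq_false_iff, beq_eq_false_iff_ne,
        ne_eq]
      exact ⟨fun h => hne h.symm, by simpa using hk'⟩
    rw [PySem.Dict.items_insert_of_not_contains _ w hk'2,
        PySem.Dict.items_insert_of_contains _ v hk,
        PySem.Dict.items_insert_of_contains _ v hk2,
        PySem.Dict.items_insert_of_not_contains _ w (by simpa using hk')]
    rw [List.map_append]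
    have : ((k', w).1 == k) = false := beq_eq_false_iff_ne.mpr (fun h => hne h.symm)
    simp [this]

-- the grouping step leaves foreign (x, y) slots untouched
lemma bbGroupStep_get?_ne (m : PySem.Dict (List String) (PySem.Dict String Int))
    (q : (String × String) × Int) (x y : String) (h : q.1 ≠ (x, y)) :
    ((bbGroupStep m q).getD [x] PySem.Dict.empty).get? y
      = (m.getD [x] PySem.Dict.empty).get? y := by
  obtain ⟨⟨a, b⟩, c⟩ := q
  rcases eq_or_ne a x with rfl | hax
  · have hby : b ≠ y := fun hb => h (by simp [hb])
    simp only [bbGroupStep, PySem.Dict.getD_insert_self,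
      PySem.Dict.getD_setdefault_self]
    exact PySem.Dict.get?_insert_of_ne _ _ (fun hy => hby hy.symm)
  · have hne : ([x] : List String) ≠ [a] := by
      intro hh; injection hh with h1 _; exact hax h1.symm
    simp only [bbGroupStep]
    rw [PySem.Dict.getD_insert_of_ne _ _ _ hne]
    by_cases hc : m.contains [a] = true
    · rw [PySem.Dict.setdefault_of_contains _ _ hc]
    · rw [PySem.Dict.setdefault_of_not_contains _ _ (by simpa using hc),
          PySem.Dict.getD_insert_of_ne _ _ _ hne]

-- folding the grouping pass over pairs different from (x, y) preserves the (x, y) slot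
lemma bbGroupFold_get?_ne (its : List ((String × String) × Int))
    (m : PySem.Dict (List String) (PySem.Dict String Int)) (x y : String)
    (h : ∀ q ∈ its, q.1 ≠ (x, y)) :
    ((its.foldl bbGroupStep m).getD [x] PySem.Dict.empty).get? y
      = (m.getD [x] PySem.Dict.empty).get? y := by
  induction its generalizing m with
  | nil => rfl
  | cons q its ih =>
    rw [List.foldl_cons, ih _ (fun p hp => h p (List.mem_cons_of_mem _ hp)),
        bbGroupStep_get?_ne _ _ _ _ (h q (List.mem_cons_self))]

-- the grouping fold preserves presence of an outer key
lemma bbGroupFold_contains (its : List ((String × String) × Int))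
    (m : PySem.Dict (List String) (PySem.Dict String Int)) (k : List String)
    (h : m.contains k = true) : (its.foldl bbGroupStep m).contains k = true := by
  induction its generalizing m with
  | nil => exact h
  | cons q its ih =>
    refine ih _ ?_
    simp [bbGroupStep, PySem.Dict.contains_insert, PySem.Dict.contains_setdefault, h]

-- one grouping step on a foreign pair commutes with updating the (x, y) slot
lemma bbGroupStep_upd_comm (m : PySem.Dict (List String) (PySem.Dict String Int))
    (q : (String × String) × Int) (x y : String) (v : Int)
    (h1 : m.contains [x] = true)
    (h2 : (m.getD [x] PySem.Dict.empty).contains y = true)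
    (h : q.1 ≠ (x, y)) :
    bbGroupStep (bbUpd x y v m) q = bbUpd x y v (bbGroupStep m q) := by
  obtain ⟨⟨a, b⟩, c⟩ := q
  rcases eq_or_ne a x with rfl | hax
  · -- same outer key, different inner key
    have hby : b ≠ y := fun hb => h (by simp [hb])
    have hcu : (bbUpd a y v m).contains [a] = true := by
      simp [bbUpd]
    have hL : bbGroupStep (bbUpd a y v m) ((a, b), c)
        = m.insert [a] (((m.getD [a] PySem.Dict.empty).insert y v).insert b c) := by
      simp only [bbGroupStep, bbUpd]
      rw [PySem.Dict.setdefault_of_contains _ _ (by simp),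
          PySem.Dict.getD_insert_self, PySem.Dict.insert_insert_self]
    have hR : bbUpd a y v (bbGroupStep m ((a, b), c))
        = m.insert [a] (((m.getD [a] PySem.Dict.empty).insert b c).insert y v) := by
      simp only [bbGroupStep, bbUpd]
      rw [PySem.Dict.setdefault_of_contains _ _ h1, PySem.Dict.getD_insert_self,
          PySem.Dict.insert_insert_self]
    rw [hL, hR, dict_insert_comm _ y b v c h2 (fun hyb => hby hyb.symm)]
  · -- different outer keys: both sides are two inserts at distinct present/fresh keys
    have hne : ([a] : List String) ≠ [x] := by
      intro hh; injection hh with h1' _; exact hax h1'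
    have hcu : (bbUpd x y v m).contains [a] = m.contains [a] := by
      simp [bbUpd, PySem.Dict.contains_insert, hax]
    have hgu : (bbUpd x y v m).getD [a] PySem.Dict.empty = m.getD [a] PySem.Dict.empty :=
      PySem.Dict.getD_insert_of_ne _ _ _ hne
    have hX : ∀ (w : PySem.Dict String Int),
        bbGroupStep (m.insert [x] w) ((a, b), c)
          = (m.insert [x] w).insert [a] ((m.getD [a] PySem.Dict.empty).insert b c) := by
      intro w
      by_cases hca : m.contains [a] = true
      · have : (m.insert [x] w).contains [a] = true := by
          simp [PySem.Dict.contains_insert, hca]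
        simp only [bbGroupStep, PySem.Dict.setdefault_of_contains _ _ this,
          PySem.Dict.getD_insert_of_ne _ _ _ hne]
      · have hca' : m.contains [a] = false := by simpa using hca
        have : (m.insert [x] w).contains [a] = false := by
          simp [PySem.Dict.contains_insert, hax, hca']
        simp only [bbGroupStep, PySem.Dict.setdefault_of_not_contains _ _ this,
          PySem.Dict.getD_insert_self, PySem.Dict.insert_insert_self,
          PySem.Dict.getD_of_not_contains _ _ hca']
    have hY : bbGroupStep m ((a, b), c)
        = m.insert [a] ((m.getD [a] PySem.Dict.empty).insert b c) := by
      by_cases hca : m.contains [a] = true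
      · simp only [bbGroupStep, PySem.Dict.setdefault_of_contains _ _ hca]
      · have hca' : m.contains [a] = false := by simpa using hca
        simp only [bbGroupStep, PySem.Dict.setdefault_of_not_contains _ _ hca',
          PySem.Dict.getD_insert_self, PySem.Dict.insert_insert_self,
          PySem.Dict.getD_of_not_contains _ _ hca']
    show bbGroupStep (m.insert [x] ((m.getD [x] PySem.Dict.empty).insert y v)) ((a, b), c)
        = bbUpd x y v (bbGroupStep m ((a, b), c))
    rw [hX, hY]
    show _ = (m.insert [a] ((m.getD [a] PySem.Dict.empty).insert b c)).insert [x]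
        (((m.insert [a] ((m.getD [a] PySem.Dict.empty).insert b c)).getD [x]
            PySem.Dict.empty).insert y v)
    rw [PySem.Dict.getD_insert_of_ne _ _ _ hne.symm]
    exact dict_insert_comm m [x] [a] _ _ h1 hne.symm

-- the grouping fold over foreign pairs commutes with updating the (x, y) slot
lemma bbGroupFold_upd_comm (its : List ((String × String) × Int))
    (m : PySem.Dict (List String) (PySem.Dict String Int)) (x y : String) (v : Int)
    (h1 : m.contains [x] = true)
    (h2 : (m.getD [x] PySem.Dict.empty).contains y = true)
    (h : ∀ q ∈ its, q.1 ≠ (x, y)) :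
    its.foldl bbGroupStep (bbUpd x y v m) = bbUpd x y v (its.foldl bbGroupStep m) := by
  induction its generalizing m with
  | nil => rfl
  | cons q its ih =>
    rw [List.foldl_cons, List.foldl_cons,
        bbGroupStep_upd_comm m q x y v h1 h2 (h q (List.mem_cons_self))]
    refine ih _ ?_ ?_ (fun p hp => h p (List.mem_cons_of_mem _ hp))
    · simp [bbGroupStep, PySem.Dict.contains_insert, PySem.Dict.contains_setdefault, h1]
    · have hq := bbGroupStep_get?_ne m q x y (h q (List.mem_cons_self))
      rw [PySem.Dict.contains_eq_isSome_get?, hq,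
          ← PySem.Dict.contains_eq_isSome_get?]
      exact h2

-- a second grouping step at the same pair just overwrites the slot value
lemma bbGroupStep_same (m : PySem.Dict (List String) (PySem.Dict String Int))
    (x y : String) (c v : Int) :
    bbGroupStep m ((x, y), v) = bbUpd x y v (bbGroupStep m ((x, y), c)) := by
  have hc : (bbGroupStep m ((x, y), c)).contains [x] = true := by
    simp [bbGroupStep]
  simp only [bbGroupStep, bbUpd, PySem.Dict.setdefault_of_contains _ _ hc,
    PySem.Dict.getD_insert_self, PySem.Dict.insert_insert_self]

-- the key lemma: one flat-counter increment, replayed through the grouping pass,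
-- is exactly A's per-pair nested update
lemma group_insert (d : PySem.Dict (String × String) Int) (x y : String)
    (hnd : d.keys.Nodup) :
    (d.insert (x, y) (d.getD (x, y) 0 + 1)).items.foldl bbGroupStep PySem.Dict.empty
      = bbNStep (d.items.foldl bbGroupStep PySem.Dict.empty) (x, y) := by
  set G := d.items.foldl bbGroupStep PySem.Dict.empty with hG
  by_cases hc : d.contains (x, y) = true
  · -- pair already counted: locate its entry in the items list
    obtain ⟨c0, hget⟩ : ∃ c0, d.get? (x, y) = some c0 := by
      have hcc := PySem.Dict.contains_eq_isSome_get? d (x, y)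
      rw [hc] at hcc
      exact Option.isSome_iff_exists.mp hcc.symm
    have hmem : ((x, y), c0) ∈ d.items := PySem.Dict.mem_items_of_get?_eq_some d hget
    have hgetD : d.getD (x, y) 0 = c0 := PySem.Dict.getD_of_get?_eq_some d 0 hget
    obtain ⟨pre, suf, hsplit⟩ := List.append_of_mem hmem
    have hnd' : (d.items.map Prod.fst).Nodup := by
      simpa [PySem.Dict.keys] using hnd
    rw [hsplit] at hnd'
    simp only [List.map_append, List.map_cons, List.nodup_append] at hnd'
    have hpre : ∀ q ∈ pre, q.1 ≠ (x, y) := by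
      intro q hq hq1
      exact (hnd'.2.2 _ (List.mem_map_of_mem hq) _ List.mem_cons_self) (by simp [hq1])
    have hsuf : ∀ q ∈ suf, q.1 ≠ (x, y) := by
      intro q hq hq1
      exact (List.nodup_cons.mp hnd'.2.1).1 (hq1 ▸ List.mem_map_of_mem hq)
    have hitems : (d.insert (x, y) (d.getD (x, y) 0 + 1)).items
        = pre ++ ((x, y), c0 + 1) :: suf := by
      rw [PySem.Dict.items_insert_of_contains _ _ hc, hsplit, hgetD,
          List.map_append, List.map_cons]
      have hpre' : List.map
          (fun p => if (p.1 == ((x, y) : String × String)) = true then ((x, y), c0 + 1) else p) pre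
          = List.map id pre :=
        List.map_congr_left (fun q hq => by
          simp [show (q.1 == ((x, y) : String × String)) = false from
            beq_eq_false_iff_ne.mpr (hpre q hq)])
      have hsuf' : List.map
          (fun p => if (p.1 == ((x, y) : String × String)) = true then ((x, y), c0 + 1) else p) suf
          = List.map id suf :=
        List.map_congr_left (fun q hq => by
          simp [show (q.1 == ((x, y) : String × String)) = false from
            beq_eq_false_iff_ne.mpr (hsuf q hq)])
      rw [hpre', hsuf', List.map_id, List.map_id]
      simp
    set m := bbGroupStep (pre.foldl bbGroupStep PySem.Dict.empty) ((x, y), c0) with hm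
    have hGm : G = suf.foldl bbGroupStep m := by
      rw [hG, hsplit, List.foldl_append, List.foldl_cons]
    have hmc : m.contains [x] = true := by
      simp [hm, bbGroupStep]
    have hmy : (m.getD [x] PySem.Dict.empty).get? y = some c0 := by
      simp [hm, bbGroupStep]
    -- left side: replay with value c0 + 1
    have hL : (d.insert (x, y) (d.getD (x, y) 0 + 1)).items.foldl bbGroupStep
          PySem.Dict.empty = bbUpd x y (c0 + 1) G := by
      rw [hitems, List.foldl_append, List.foldl_cons,
          bbGroupStep_same _ x y c0 (c0 + 1),
          bbGroupFold_upd_comm suf m x y (c0 + 1) hmc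
            (by rw [PySem.Dict.contains_eq_isSome_get?, hmy]; rfl) hsuf, hGm]
    -- right side: A's step takes the increment branch
    have hGy : (G.getD [x] PySem.Dict.empty).get? y = some c0 := by
      rw [hGm, bbGroupFold_get?_ne suf m x y hsuf, hmy]
    have hGc : G.contains [x] = true := by
      rw [hGm]; exact bbGroupFold_contains suf m [x] hmc
    have hGyc : (G.getD [x] PySem.Dict.empty).contains y = true := by
      rw [PySem.Dict.contains_eq_isSome_get?, hGy]; rfl
    have hGD : (G.getD [x] PySem.Dict.empty).getD y 0 = c0 :=
      PySem.Dict.getD_of_get?_eq_some _ 0 hGy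
    rw [hL]
    simp [bbNStep, bbStepA, hGc, hGyc, hGD, bbUpd]
  · -- fresh pair: the counter appends it with value 1
    have hc' : d.contains (x, y) = false := by simpa using hc
    have hval : d.getD (x, y) 0 + 1 = 1 := by
      rw [PySem.Dict.getD_of_not_contains _ _ hc']; omega
    have hitems : (d.insert (x, y) (d.getD (x, y) 0 + 1)).items
        = d.items ++ [((x, y), 1)] := by
      rw [PySem.Dict.items_insert_of_not_contains _ _ hc', hval]
    have hforeign : ∀ q ∈ d.items, q.1 ≠ (x, y) := by
      intro q hq hq1
      apply hc
      rw [← hq1, PySem.Dict.contains_iff_mem_keys]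
      exact PySem.Dict.mem_keys_of_mem_items d hq
    have hGy : (G.getD [x] PySem.Dict.empty).get? y = none := by
      rw [hG, bbGroupFold_get?_ne d.items PySem.Dict.empty x y hforeign]
      simp [PySem.Dict.getD_empty, PySem.Dict.get?_empty]
    have hGyc : (G.getD [x] PySem.Dict.empty).contains y = false := by
      rw [PySem.Dict.contains_eq_isSome_get?, hGy]; rfl
    rw [hitems, List.foldl_append, List.foldl_cons, List.foldl_nil, ← hG]
    by_cases hGc : G.contains [x] = true
    · simp only [bbGroupStep, PySem.Dict.setdefault_of_contains _ _ hGc,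
        bbNStep, bbStepA, hGc, if_pos, hGyc]
      simp
    · have hGc' : G.contains [x] = false := by simpa using hGc
      simp only [bbGroupStep, PySem.Dict.setdefault_of_not_contains _ _ hGc',
        bbNStep, bbStepA, hGc', PySem.Dict.getD_insert_self,
        PySem.Dict.insert_insert_self]
      simp

-- A's per-pair fold equals B's count-then-group pipeline, over any pair list
lemma nstep_eq_count_group (ps : List (String × String)) :
    ps.foldl bbNStep PySem.Dict.empty
      = (ps.foldl bbCountStep PySem.Dict.empty).items.foldl bbGroupStep PySem.Dict.empty := by
  induction ps using List.reverseRecOn with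
  | nil => rfl
  | append_singleton ps p ih =>
    obtain ⟨x, y⟩ := p
    have hnd : (ps.foldl bbCountStep PySem.Dict.empty).keys.Nodup := by
      simpa [bbCountStep] using
        PySem.Dict.nodup_keys_foldl_insert ps
          (fun d q => d.getD q 0 + 1) PySem.Dict.empty
          (by simp [PySem.Dict.keys_empty])
    rw [List.foldl_append, List.foldl_append]
    simp only [List.foldl_cons, List.foldl_nil, bbCountStep]
    rw [group_insert _ x y hnd, ih]

-- ===== VERDICT (by name: the statement is the Claim_ definition above) =====
theorem build_bigram_spec : Claim_equal_build_bigram := by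
  intro sequence _
  show build_bigram sequence = build_bigram_alt sequence
  cases sequence with
  | nil => rfl
  | cons x rest =>
    simp only [build_bigram, build_bigram_alt, PySem.List.slice_from_one, List.tail_cons]
    rw [show (x :: rest).foldl bbStepA (none, PySem.Dict.empty)
          = rest.foldl bbStepA (some [x], PySem.Dict.empty) from rfl,
        bbLoopA_eq, nstep_eq_count_group]
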